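-- pv_equiv track=rewrite | github.com/Xreflextion/Cryptography | cipher_functions.py | is_valid_deck
-- ===== SOURCE A (Python) =====
-- def is_valid_deck(deck):
--     numbers = list(range(1, len(deck) + 1))
--     for card in deck:
--         if card in numbers:
--             numbers.remove(card)
--         else:
--             return False
--     return True
-- ===== SOURCE B (Python) =====
-- def is_valid_deck(deck):
--     return sorted(deck) == list(range(1, len(deck) + 1))
-- ===== Notes on version B (the rewrite author's own statement) =====
-- stated objective: simpler
-- what changed: Replaces A's scan-and-remove loop over a mutable 1..n list with a one-line sort-then-compare against list(range(1, n+1)).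
import Mathlib
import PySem

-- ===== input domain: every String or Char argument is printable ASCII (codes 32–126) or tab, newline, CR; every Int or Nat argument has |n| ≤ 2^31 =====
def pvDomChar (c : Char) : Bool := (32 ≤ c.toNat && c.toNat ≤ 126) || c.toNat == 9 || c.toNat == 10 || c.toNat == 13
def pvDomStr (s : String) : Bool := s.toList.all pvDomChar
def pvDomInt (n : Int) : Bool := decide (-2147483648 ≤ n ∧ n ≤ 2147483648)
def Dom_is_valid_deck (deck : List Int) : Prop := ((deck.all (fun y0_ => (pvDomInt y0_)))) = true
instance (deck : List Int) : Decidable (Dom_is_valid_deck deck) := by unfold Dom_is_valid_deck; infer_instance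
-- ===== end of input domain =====

-- B replaces A's scan-and-remove loop with a one-line sorted(deck) == list(range(1, n+1)) comparison (simpler).

-- ===== PORT A =====
-- the 'for card in deck' loop with its mutable 'numbers' list and early 'return False'
def isValidDeckLoopA (cards : List Int) (numbers : List Int) : Bool :=
  match cards with
  | [] => true
  | card :: rest =>
    if numbers.contains card then
      match PySem.List.remove? numbers card with
      | some numbers' => isValidDeckLoopA rest numbers'
      | none => false          -- unreachable: guarded by the membership test
    else false

def is_valid_deck (deck : List Int) : Bool :=
  isValidDeckLoopA deck (PySem.List.pyRange 1 ((deck.length : Int) + 1) 1)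

-- ===== PORT B =====
def is_valid_deck_alt (deck : List Int) : Bool :=
  decide (PySem.List.sorted deck (fun x => x) false
            = PySem.List.pyRange 1 ((deck.length : Int) + 1) 1)

-- ===== PRECONDITION & SPEC =====
def Spec_is_valid_deck (deck : List Int) (out : Bool) : Prop := out = is_valid_deck_alt deck
instance (deck : List Int) (out : Bool) : Decidable (Spec_is_valid_deck deck out) := by unfold Spec_is_valid_deck; infer_instance

-- ===== CLAIM (what is proved, stated in full; the proofs are below) =====
def Claim_equal_is_valid_deck : Prop := ∀ (deck : List Int), Dom_is_valid_deck deck → Spec_is_valid_deck deck (is_valid_deck deck)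

-- ===== LEMMAS AND PROOFS =====

theorem loopA_true_iff_subperm (cards numbers : List Int) :
    isValidDeckLoopA cards numbers = true ↔ cards.Subperm numbers := by
  induction cards generalizing numbers with
  | nil => simp [isValidDeckLoopA, List.nil_subperm]
  | cons card rest ih =>
    by_cases hmem : card ∈ numbers
    · rw [isValidDeckLoopA, if_pos (by simpa using hmem),
        PySem.List.remove?_eq_some_erase numbers card hmem]
      rw [ih]
      constructor
      · intro h
        exact ((List.subperm_cons card).2 h).trans
          (List.Perm.subperm (List.perm_cons_erase hmem).symm)
      · intro h
        have := h.erase card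
        simpa using this
    · rw [isValidDeckLoopA, if_neg (by simpa using hmem)]
      refine iff_of_false (by simp) ?_
      intro h
      exact hmem (h.subset List.mem_cons_self)

theorem a_true_iff_perm (deck : List Int) :
    is_valid_deck deck = true
      ↔ deck.Perm (PySem.List.pyRange 1 ((deck.length : Int) + 1) 1) := by
  rw [is_valid_deck, loopA_true_iff_subperm]
  constructor
  · intro h
    refine h.perm_of_length_le ?_
    simp [PySem.List.length_pyRange_one]
  · exact fun h => h.subperm

theorem b_true_iff_perm (deck : List Int) :
    is_valid_deck_alt deck = true
      ↔ deck.Perm (PySem.List.pyRange 1 ((deck.length : Int) + 1) 1) := by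
  rw [is_valid_deck_alt, decide_eq_true_iff]
  constructor
  · intro h
    exact (PySem.List.sorted_perm deck (fun x => x) false).symm.trans (h ▸ List.Perm.refl _)
  · intro h
    exact PySem.List.sorted_eq_of_perm_of_pairwise_lt deck _ (fun x => x) h.symm
      (PySem.List.pairwise_lt_pyRange_one 1 ((deck.length : Int) + 1))

-- ===== VERDICT (by name: the statement is the Claim_ definition above) =====
theorem is_valid_deck_spec : Claim_equal_is_valid_deck := by
  intro deck _
  unfold Spec_is_valid_deck
  rw [Bool.eq_iff_iff, a_true_iff_perm, b_true_iff_perm]
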